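-- pv_equiv track=rewrite | github.com/chrdz/2014-MancalaGame | GUI_move_functions.py | ft_see_the_next
-- ===== SOURCE A (Python) =====
-- def ft_see_the_next(pos_dep, where):
--     """return the x and y positions of the next house"""
--
--     x_stop=0 #coordinates of the next position
--     y_stop=0
--
--     x=[131,211,291,371,451] #x of the houses from left to right
--     met=[[],[]] #[[player_0:[x,y of the houses]],[player_1:[x,y of the houses]]]
--
--     #building of met:
--     met[0]=[[elem,297] for elem in x]
--     met[1]=[[elem,185] for elem in reversed(x)]
--     met[0].append([491,241])
--     met[1].append([91,241])
--     index_final = pos_dep%6 #index of the next house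
--     list_final =  where #list (0 or 1) in whic is the next house
--
--     x_stop=met[list_final][index_final][0] #A COMPACTER########
--     y_stop=met[list_final][index_final][1]
--
--     return([x_stop, y_stop])
-- ===== SOURCE B (Python) =====
-- def ft_see_the_next(pos_dep, where):
--     """return the x and y positions of the next house"""
--     i = pos_dep % 6
--     bottom = (True, False)[where]  # which row: player 0's (bottom) or player 1's
--     if i == 5:
--         return [491, 241] if bottom else [91, 241]
--     return [131 + 80 * i, 297] if bottom else [451 - 80 * i, 185]
-- ===== Notes on version B (the rewrite author's own statement) =====
-- stated objective: simpler
-- what changed: Replaces the two built coordinate tables and the double list indexing by a closed-form arithmetic formula on pos_dep%6, selecting the row by a 2-element tuple lookup on where.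
import Mathlib
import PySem

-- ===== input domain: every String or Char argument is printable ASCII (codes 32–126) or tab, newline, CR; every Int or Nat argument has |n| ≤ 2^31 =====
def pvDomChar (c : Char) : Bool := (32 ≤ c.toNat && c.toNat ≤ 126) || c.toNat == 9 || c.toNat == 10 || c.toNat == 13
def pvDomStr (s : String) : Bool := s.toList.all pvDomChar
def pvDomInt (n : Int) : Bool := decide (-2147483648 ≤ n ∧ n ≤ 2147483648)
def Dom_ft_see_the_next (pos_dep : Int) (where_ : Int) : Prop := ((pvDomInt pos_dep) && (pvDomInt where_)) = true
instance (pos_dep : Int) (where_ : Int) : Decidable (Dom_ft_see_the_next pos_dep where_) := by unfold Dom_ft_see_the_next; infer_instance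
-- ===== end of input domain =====

-- B replaces A's built coordinate tables and double list indexing by a closed-form
-- arithmetic formula on pos_dep%6, with the row picked by a 2-element lookup on where
-- (objective: simpler).

-- ===== PORT A =====
def ft_see_the_next (pos_dep : Int) (where_ : Int) : List Int :=
  let x : List Int := [131, 211, 291, 371, 451]
  let met0 : List (List Int) := (x.map (fun elem => [elem, 297])) ++ [[491, 241]]
  let met1 : List (List Int) := (x.reverse.map (fun elem => [elem, 185])) ++ [[91, 241]]
  let met : List (List (List Int)) := [met0, met1]
  let index_final := PySem.Int.mod pos_dep 6
  let list_final := where_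
  let x_stop := PySem.List.pyGetD (PySem.List.pyGetD (PySem.List.pyGetD met list_final []) index_final []) 0 0
  let y_stop := PySem.List.pyGetD (PySem.List.pyGetD (PySem.List.pyGetD met list_final []) index_final []) 1 0
  [x_stop, y_stop]

-- ===== PORT B =====
def ft_see_the_next_alt (pos_dep : Int) (where_ : Int) : List Int :=
  let i := PySem.Int.mod pos_dep 6
  let bottom := PySem.List.pyGetD [true, false] where_ true
  if i = 5 then
    if bottom then [491, 241] else [91, 241]
  else
    if bottom then [131 + 80 * i, 297] else [451 - 80 * i, 185]

-- ===== PRECONDITION & SPEC =====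
-- Pre_ excludes exactly the inputs where A raises IndexError (where outside {-2,-1,0,1}).
def Pre_ft_see_the_next (pos_dep : Int) (where_ : Int) : Prop := -2 ≤ where_ ∧ where_ < 2
instance (pos_dep : Int) (where_ : Int) : Decidable (Pre_ft_see_the_next pos_dep where_) := by
  unfold Pre_ft_see_the_next; infer_instance
def pvWitness_ft_see_the_next : Int × Int := (3, 1)

def Spec_ft_see_the_next (pos_dep : Int) (where_ : Int) (out : List Int) : Prop := out = ft_see_the_next_alt pos_dep where_
instance (pos_dep : Int) (where_ : Int) (out : List Int) : Decidable (Spec_ft_see_the_next pos_dep where_ out) := by unfold Spec_ft_see_the_next; infer_instance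

-- ===== CLAIM (what is proved, stated in full; the proofs are below) =====
def Claim_equal_ft_see_the_next : Prop := ∀ (pos_dep : Int) (where_ : Int), Dom_ft_see_the_next pos_dep where_ → Pre_ft_see_the_next pos_dep where_ → Spec_ft_see_the_next pos_dep where_ (ft_see_the_next pos_dep where_)

-- ===== LEMMAS AND PROOFS =====

-- ===== VERDICT (by name: the statement is the Claim_ definition above) =====
theorem ft_see_the_next_spec : Claim_equal_ft_see_the_next := by
  intro pos_dep where_ _ hpre
  obtain ⟨hlo, hhi⟩ := hpre
  unfold Spec_ft_see_the_next ft_see_the_next ft_see_the_next_alt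
  have h6 : PySem.Int.mod pos_dep 6 = pos_dep % 6 :=
    PySem.Int.mod_eq_emod_of_pos (by omega)
  simp only [h6]
  have hk0 : 0 ≤ pos_dep % 6 := Int.emod_nonneg _ (by omega)
  have hk6 : pos_dep % 6 < 6 := Int.emod_lt_of_pos _ (by omega)
  interval_cases where_ <;>
    (generalize pos_dep % 6 = k at hk0 hk6 ⊢; interval_cases k <;> decide)
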